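-- pv_equiv track=rewrite | github.com/Vaxity1/Aether | main - Copy (2).py | get_text_stats
-- ===== SOURCE A (Python) =====
-- def split_lines(text: str) -> list[str]:
--     return text.replace('\r\n', '\n').replace('\r', '\n').split('\n')
--
-- def get_text_stats(text: str) -> dict[str, int]:
--     lines = split_lines(text)
--     chars = len(text)
--     nonempty = [l for l in lines if l.strip()]
--     return {
--         "Total Lines": len(lines),
--         "Non-Empty Lines": len(nonempty),
--         "Characters": chars,
--         "Words": sum(len(l.split()) for l in lines),
--     }
-- ===== SOURCE B (Python) =====
-- def get_text_stats(text: str) -> dict[str, int]: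
--     # Single pass over the characters: a small state machine tracking the
--     # current line (has it a non-space char?) and whether we are inside a word.
--     total_lines = 1
--     nonempty = 0
--     words = 0
--     line_has = False
--     in_word = False
--     prev_cr = False
--     for ch in text:
--         if ch == '\n' and prev_cr:
--             prev_cr = False
--             continue
--         if ch == '\r' or ch == '\n':
--             total_lines += 1
--             if line_has:
--                 nonempty += 1
--             if in_word:
--                 words += 1
--             line_has = False
--             in_word = False
--             prev_cr = (ch == '\r')
--         elif ch.isspace():
--             if in_word:
--                 words += 1
--             in_word = False
--             prev_cr = False
--         else:
--             line_has = True
--             in_word = True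
--             prev_cr = False
--     if line_has:
--         nonempty += 1
--     if in_word:
--         words += 1
--     return {
--         "Total Lines": total_lines,
--         "Non-Empty Lines": nonempty,
--         "Characters": len(text),
--         "Words": words,
--     }
-- ===== Notes on version B (the rewrite author's own statement) =====
-- stated objective: alternative
-- what changed: Replaces the replace/replace/split pipeline plus per-line strip() and split() passes by one single-pass character state machine that counts lines, non-empty lines and words directly.
import Mathlib
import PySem

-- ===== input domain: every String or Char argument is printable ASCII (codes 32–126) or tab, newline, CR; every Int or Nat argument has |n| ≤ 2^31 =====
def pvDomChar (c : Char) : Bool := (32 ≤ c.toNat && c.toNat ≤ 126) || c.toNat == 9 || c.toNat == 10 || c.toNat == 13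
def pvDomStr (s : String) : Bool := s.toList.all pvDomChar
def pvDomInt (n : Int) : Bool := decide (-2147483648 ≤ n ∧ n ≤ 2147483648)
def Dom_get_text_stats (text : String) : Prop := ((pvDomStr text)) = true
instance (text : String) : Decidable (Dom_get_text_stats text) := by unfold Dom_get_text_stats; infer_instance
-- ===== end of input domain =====

-- B replaces A's replace/split pipeline and per-line strip()/split() passes by one
-- single-pass character state machine; an alternative decomposition, not claimed faster.


-- ===== PORT A =====
-- split_lines: text.replace('\r\n','\n').replace('\r','\n').split('\n'); kept on List Char
-- (PySem.Str functions are thin wrappers over PySem.Chars on toList; '\n' is a nonempty sep, so split = Chars.splitOn).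
def split_lines (text : String) : List (List Char) :=
  PySem.Chars.splitOn
    (PySem.Chars.replace (PySem.Chars.replace text.toList ['\r', '\n'] ['\n']) ['\r'] ['\n'])
    ['\n']

def get_text_stats (text : String) : List (String × Int) :=
  let lines := split_lines text
  let chars : Int := PySem.Str.len text
  let nonempty := lines.filter (fun l => !(PySem.Chars.strip l).isEmpty)
  [("Total Lines", (lines.length : Int)),
   ("Non-Empty Lines", (nonempty.length : Int)),
   ("Characters", chars),
   ("Words", (lines.map (fun l => ((PySem.Chars.split₀ l).length : Int))).sum)]

-- ===== PORT B =====
-- state = (total_lines, nonempty, words, line_has, in_word, prev_cr)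
def bStep (s : Int × Int × Int × Bool × Bool × Bool) (ch : Char) :
    Int × Int × Int × Bool × Bool × Bool :=
  match s with
  | (tl, ne, w, lh, iw, pcr) =>
    if ch = '\n' ∧ pcr then (tl, ne, w, lh, iw, false)
    else if ch = '\r' ∨ ch = '\n' then
      (tl + 1, if lh then ne + 1 else ne, if iw then w + 1 else w, false, false, ch = '\r')
    else if PySem.Chars.isspace ch then
      (tl, ne, if iw then w + 1 else w, lh, false, false)
    else (tl, ne, w, true, true, false)

def get_text_stats_alt (text : String) : List (String × Int) :=
  match text.toList.foldl bStep (1, 0, 0, false, false, false) with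
  | (tl, ne, w, lh, iw, _) =>
    [("Total Lines", tl),
     ("Non-Empty Lines", if lh then ne + 1 else ne),
     ("Characters", PySem.Str.len text),
     ("Words", if iw then w + 1 else w)]

-- ===== PRECONDITION & SPEC =====
def Spec_get_text_stats (text : String) (out : List (String × Int)) : Prop := out = get_text_stats_alt text
instance (text : String) (out : List (String × Int)) : Decidable (Spec_get_text_stats text out) := by unfold Spec_get_text_stats; infer_instance

-- ===== CLAIM (what is proved, stated in full; the proofs are below) =====
def Claim_equal_get_text_stats : Prop := ∀ (text : String), Dom_get_text_stats text → Spec_get_text_stats text (get_text_stats text)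

-- ===== LEMMAS AND PROOFS =====

-- the normalized line list, as one direct recursion over the characters
def consHead (c : Char) : List (List Char) → List (List Char)
  | h :: ts => (c :: h) :: ts
  | [] => [[c]]

def splitLinesRec : List Char → List (List Char)
  | [] => [[]]
  | '\r' :: '\n' :: t => [] :: splitLinesRec t
  | '\r' :: t => [] :: splitLinesRec t
  | '\n' :: t => [] :: splitLinesRec t
  | c :: t => consHead c (splitLinesRec t)

-- text.replace('\r\n','\n') as a direct recursion
def norm1 : List Char → List Char
  | '\r' :: '\n' :: t => '\n' :: norm1 t
  | c :: t => c :: norm1 t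
  | [] => []

-- .replace('\r','\n') as a direct recursion
def norm2 : List Char → List Char
  | '\r' :: t => '\n' :: norm2 t
  | c :: t => c :: norm2 t
  | [] => []

-- .split('\n') as a direct recursion
def mySplit : List Char → List (List Char)
  | [] => [[]]
  | '\n' :: t => [] :: mySplit t
  | c :: t => consHead c (mySplit t)

-- number of words (maximal non-space runs), seeded with "currently inside a word"
def countWords : List Char → Bool → Nat
  | [], iw => if iw then 1 else 0
  | c :: t, iw =>
    if PySem.Chars.isspace c then (if iw then 1 else 0) + countWords t false
    else countWords t true

def hasNon (l : List Char) : Bool := l.any (fun c => !PySem.Chars.isspace c)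

-- non-empty-line count, the first line seeded with "already saw a non-space char"
def neCount : List (List Char) → Bool → Int
  | [], _ => 0
  | l :: ls, lh => (if lh || hasNon l then 1 else 0) + neCount ls false

-- word count over lines, the first line seeded with "inside a word"
def wCount : List (List Char) → Bool → Int
  | [], _ => 0
  | l :: ls, iw => (countWords l iw : Int) + wCount ls false

theorem mySplit_ne_nil (l : List Char) : mySplit l ≠ [] := by
  fun_induction mySplit l <;> simp_all [consHead]
  · split <;> simp

theorem splitLinesRec_ne_nil (l : List Char) : splitLinesRec l ≠ [] := by
  fun_induction splitLinesRec l <;> simp_all [consHead]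
  · split <;> simp

theorem replace_go_crlf (l : List Char) : ∀ (fuel : Nat) (acc : List Char), l.length ≤ fuel →
    PySem.Chars.replace.go ['\r', '\n'] ['\n'] fuel l acc = acc.reverse ++ norm1 l := by
  fun_induction norm1 l with
  | case1 t ih =>
    intro fuel acc h
    match fuel with
    | f + 1 =>
      rw [show PySem.Chars.replace.go ['\r','\n'] ['\n'] (f+1) ('\r'::'\n'::t) acc
            = PySem.Chars.replace.go ['\r','\n'] ['\n'] f t ('\n'::acc) by
        simp [PySem.Chars.replace.go, List.isPrefixOf]]
      rw [ih f ('\n'::acc) (by simp at h; omega)]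
      simp
  | case2 c t hne ih =>
    intro fuel acc h
    have hp : List.isPrefixOf ['\r','\n'] (c::t) = false := by
      rcases t with _ | ⟨c2, t2⟩
      · simp [List.isPrefixOf]
      · simp [List.isPrefixOf]
        rintro h1 h2
        exact hne t2 h1.symm (by rw [← h2])
    match fuel with
    | f + 1 =>
      rw [show PySem.Chars.replace.go ['\r','\n'] ['\n'] (f+1) (c::t) acc
            = PySem.Chars.replace.go ['\r','\n'] ['\n'] f t (c::acc) by
        simp [PySem.Chars.replace.go, hp]]
      rw [ih f (c::acc) (by simp at h; omega)]
      simp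
  | case3 => intro fuel acc h; match fuel with
             | 0 => simp [PySem.Chars.replace.go]
             | f+1 => simp [PySem.Chars.replace.go]

theorem replace_go_cr (l : List Char) : ∀ (fuel : Nat) (acc : List Char), l.length ≤ fuel →
    PySem.Chars.replace.go ['\r'] ['\n'] fuel l acc = acc.reverse ++ norm2 l := by
  fun_induction norm2 l with
  | case1 t ih =>
    intro fuel acc h
    match fuel with
    | f + 1 =>
      rw [show PySem.Chars.replace.go ['\r'] ['\n'] (f+1) ('\r'::t) acc
            = PySem.Chars.replace.go ['\r'] ['\n'] f t ('\n'::acc) by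
        simp [PySem.Chars.replace.go, List.isPrefixOf]]
      rw [ih f ('\n'::acc) (by simp at h; omega)]
      simp
  | case2 c t hne ih =>
    intro fuel acc h
    have hp : List.isPrefixOf ['\r'] (c::t) = false := by
      simp [List.isPrefixOf]; exact fun h => hne h.symm
    match fuel with
    | f + 1 =>
      rw [show PySem.Chars.replace.go ['\r'] ['\n'] (f+1) (c::t) acc
            = PySem.Chars.replace.go ['\r'] ['\n'] f t (c::acc) by
        simp [PySem.Chars.replace.go, hp]]
      rw [ih f (c::acc) (by simp at h; omega)]
      simp
  | case3 => intro fuel acc h; match fuel with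
             | 0 => simp [PySem.Chars.replace.go]
             | f+1 => simp [PySem.Chars.replace.go]

theorem splitOn_go_lf (l : List Char) : ∀ (fuel : Nat) (cur : List Char) (acc : List (List Char)),
    l.length < fuel →
    PySem.Chars.splitOn.go ['\n'] fuel l cur acc =
      acc.reverse ++ (match mySplit l with
        | h :: ts => (cur.reverse ++ h) :: ts
        | [] => [cur.reverse]) := by
  fun_induction mySplit l with
  | case1 =>
    intro fuel cur acc h
    match fuel with
    | f + 1 => simp [PySem.Chars.splitOn.go]
  | case2 t ih =>
    intro fuel cur acc h
    match fuel with
    | f + 1 =>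
      rw [show PySem.Chars.splitOn.go ['\n'] (f+1) ('\n'::t) cur acc
            = PySem.Chars.splitOn.go ['\n'] f t [] (cur.reverse :: acc) by
        simp [PySem.Chars.splitOn.go, List.isPrefixOf]]
      rw [ih f [] (cur.reverse :: acc) (by simp at h; omega)]
      rcases hm : mySplit t with _ | ⟨mh, mts⟩
      · exact absurd hm (mySplit_ne_nil t)
      · simp
  | case3 c t hne ih =>
    intro fuel cur acc h
    have hp : List.isPrefixOf ['\n'] (c::t) = false := by
      simp [List.isPrefixOf]; exact fun h => hne h.symm
    match fuel with
    | f + 1 =>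
      rw [show PySem.Chars.splitOn.go ['\n'] (f+1) (c::t) cur acc
            = PySem.Chars.splitOn.go ['\n'] f t (c::cur) acc by
        simp [PySem.Chars.splitOn.go, hp]]
      rw [ih f (c::cur) acc (by simp at h; omega)]
      rcases hm : mySplit t with _ | ⟨mh, mts⟩
      · exact absurd hm (mySplit_ne_nil t)
      · simp [consHead]

theorem split_of_norm (cs : List Char) : mySplit (norm2 (norm1 cs)) = splitLinesRec cs := by
  fun_induction splitLinesRec cs with
  | case1 => rfl
  | case2 t ih => simp [norm1, norm2, mySplit, ih]
  | case3 t hne ih => simp_all [norm1, norm2, mySplit]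
  | case4 t ih => simp_all [norm1, norm2, mySplit]
  | case5 c t h1 h2 h3 ih => simp_all [norm1, norm2, mySplit, consHead]

theorem split_lines_eq (text : String) : split_lines text = splitLinesRec text.toList := by
  unfold split_lines
  rw [show PySem.Chars.replace text.toList ['\r','\n'] ['\n'] = norm1 text.toList by
    rw [PySem.Chars.replace]; simp
    exact replace_go_crlf _ _ [] le_rfl]
  rw [show PySem.Chars.replace (norm1 text.toList) ['\r'] ['\n'] = norm2 (norm1 text.toList) by
    rw [PySem.Chars.replace]; simp
    exact replace_go_cr _ _ [] le_rfl]
  rw [PySem.Chars.splitOn, splitOn_go_lf _ _ [] [] (by omega)]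
  rw [split_of_norm]
  rcases hL : splitLinesRec text.toList with _ | ⟨h, ts⟩
  · exact absurd hL (splitLinesRec_ne_nil _)
  · simp

theorem strip_isEmpty (l : List Char) : (PySem.Chars.strip l).isEmpty = !hasNon l := by
  have key : PySem.Chars.strip l = [] ↔ ∀ x ∈ l, PySem.Chars.isspace x := by
    rw [PySem.Chars.strip, PySem.Chars.rstrip, PySem.Chars.lstrip]
    simp [List.dropWhile_eq_nil_iff]
    constructor
    · intro h x hx
      rcases List.mem_append.mp
          ((List.takeWhile_append_dropWhile (p := PySem.Chars.isspace) (l := l)) ▸ hx) with h1 | h2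
      · exact List.mem_takeWhile_imp h1
      · exact h x h2
    · intro h x hx
      exact h x ((List.dropWhile_sublist (p := PySem.Chars.isspace) (l := l)).subset hx)
  by_cases h : hasNon l = true
  · obtain ⟨x, hx, hxs⟩ : ∃ x ∈ l, ¬ PySem.Chars.isspace x = true := by simpa [hasNon] using h
    have hne : PySem.Chars.strip l ≠ [] := fun hc => hxs (key.mp hc x hx)
    simp [h, List.isEmpty_eq_false_iff.mpr hne]
  · have hall : ∀ x ∈ l, PySem.Chars.isspace x := by
      intro x hx
      by_contra hxs
      exact h (by simp [hasNon]; exact ⟨x, hx, by simpa using hxs⟩)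
    simp [Bool.not_eq_true] at h
    simp [h, key.mpr hall]

theorem split₀_go_length (l : List Char) : ∀ (cur : List Char) (acc : List (List Char)),
    (PySem.Chars.split₀.go l cur acc).length = acc.length + countWords l (!cur.isEmpty) := by
  induction l with
  | nil => intro cur acc; rcases cur with _ | ⟨c, cs⟩ <;> simp [PySem.Chars.split₀.go, countWords]
  | cons c t ih =>
    intro cur acc
    by_cases hs : PySem.Chars.isspace c
    · rcases cur with _ | ⟨c0, cs⟩
      · simp [PySem.Chars.split₀.go, hs, ih, countWords]
      · simp [PySem.Chars.split₀.go, hs, ih, countWords]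
        omega
    · rcases cur with _ | ⟨c0, cs⟩ <;>
        simp [PySem.Chars.split₀.go, hs, ih, countWords]

theorem split₀_length (l : List Char) : (PySem.Chars.split₀ l).length = countWords l false := by
  rw [PySem.Chars.split₀, split₀_go_length]; simp

-- the main fold invariant for B
theorem foldB_spec (cs : List Char) : ∀ (tl ne w : Int) (lh iw : Bool),
    (match cs.foldl bStep (tl, ne, w, lh, iw, false) with
      | (tl', ne', w', lh', iw', _) =>
        ((tl', if lh' then ne' + 1 else ne', if iw' then w' + 1 else w') : Int × Int × Int)) =
      (tl + (splitLinesRec cs).length - 1, ne + neCount (splitLinesRec cs) lh,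
        w + wCount (splitLinesRec cs) iw) := by
  fun_induction splitLinesRec cs with
  | case1 =>
    intro tl ne w lh iw
    simp [neCount, wCount, countWords, hasNon, Prod.ext_iff]
    split_ifs <;> simp_all
  | case2 t ih =>
    intro tl ne w lh iw
    rw [show (('\r'::'\n'::t).foldl bStep (tl, ne, w, lh, iw, false))
          = t.foldl bStep (tl + 1, if lh then ne + 1 else ne, if iw then w + 1 else w,
              false, false, false) by
      simp [List.foldl, bStep]]
    rw [ih (tl+1) _ _ false false]
    simp [neCount, wCount, countWords, hasNon, Prod.ext_iff]
    refine ⟨by omega, by split_ifs <;> omega, by split_ifs <;> omega⟩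
  | case3 t hne ih =>
    intro tl ne w lh iw
    rcases t with _ | ⟨c, t'⟩
    · simp [List.foldl, bStep, splitLinesRec, neCount, wCount, countWords, hasNon, Prod.ext_iff]
      refine ⟨by omega, by split_ifs <;> omega, by split_ifs <;> omega⟩
    · have hc : ¬ c = '\n' := fun hcc => hne t' (by rw [hcc])
      have hstep : bStep (tl + 1, if lh then ne + 1 else ne, if iw then w + 1 else w,
              false, false, true) c
          = bStep (tl + 1, if lh then ne + 1 else ne, if iw then w + 1 else w,
              false, false, false) c := by
        simp [bStep, hc]
      rw [show ((('\r'::c::t').foldl bStep (tl, ne, w, lh, iw, false)))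
            = t'.foldl bStep (bStep (tl + 1, if lh then ne + 1 else ne,
                if iw then w + 1 else w, false, false, true) c) by
        simp [List.foldl, bStep]]
      rw [hstep]
      rw [show t'.foldl bStep (bStep (tl + 1, if lh then ne + 1 else ne,
              if iw then w + 1 else w, false, false, false) c)
            = (c::t').foldl bStep (tl + 1, if lh then ne + 1 else ne,
              if iw then w + 1 else w, false, false, false) by
        simp [List.foldl]]
      rw [ih (tl+1) _ _ false false]
      simp [neCount, wCount, countWords, hasNon, Prod.ext_iff]
      refine ⟨by omega, by split_ifs <;> omega, by split_ifs <;> omega⟩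
  | case4 t ih =>
    intro tl ne w lh iw
    rw [show (('\n'::t).foldl bStep (tl, ne, w, lh, iw, false))
          = t.foldl bStep (tl + 1, if lh then ne + 1 else ne, if iw then w + 1 else w,
              false, false, false) by
      simp [List.foldl, bStep]]
    rw [ih (tl+1) _ _ false false]
    simp [neCount, wCount, countWords, hasNon, Prod.ext_iff]
    refine ⟨by omega, by split_ifs <;> omega, by split_ifs <;> omega⟩
  | case5 c t h1 h2 h3 ih =>
    intro tl ne w lh iw
    have hr : ¬ c = '\r' := fun hcc => h2 hcc
    have hn : ¬ c = '\n' := fun hcc => h3 hcc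
    obtain ⟨lh0, ts, hL⟩ : ∃ lh0 ts, splitLinesRec t = lh0 :: ts := by
      rcases hsp : splitLinesRec t with _ | ⟨a, b⟩
      · exact absurd hsp (splitLinesRec_ne_nil t)
      · exact ⟨a, b, rfl⟩
    by_cases hs : PySem.Chars.isspace c
    · rw [show ((c::t).foldl bStep (tl, ne, w, lh, iw, false))
            = t.foldl bStep (tl, ne, if iw then w + 1 else w, lh, false, false) by
        simp [List.foldl, bStep, hr, hn, hs]]
      rw [ih tl ne _ lh false]
      rw [hL]
      simp [consHead, neCount, wCount, countWords, hasNon, hs, Prod.ext_iff]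
      split_ifs <;> omega
    · rw [show ((c::t).foldl bStep (tl, ne, w, lh, iw, false))
            = t.foldl bStep (tl, ne, w, true, true, false) by
        simp [List.foldl, bStep, hr, hn, hs]]
      rw [ih tl ne w true true]
      rw [hL]
      simp [consHead, neCount, wCount, countWords, hasNon, hs]

theorem neCount_false (L : List (List Char)) :
    neCount L false = ((L.filter (fun l => hasNon l)).length : Int) := by
  induction L with
  | nil => rfl
  | cons l ls ih =>
    by_cases h : hasNon l
    · simp [neCount, h, ih]
      omega
    · simp [neCount, h, ih]

theorem wCount_false (L : List (List Char)) :
    wCount L false = (L.map (fun l => ((countWords l false : Nat) : Int))).sum := by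
  induction L with
  | nil => rfl
  | cons l ls ih => simp [wCount, ih]

-- ===== VERDICT (by name: the statement is the Claim_ definition above) =====
theorem get_text_stats_spec : Claim_equal_get_text_stats := by
  intro text _
  unfold Spec_get_text_stats get_text_stats get_text_stats_alt
  rw [split_lines_eq]
  rcases hS : text.toList.foldl bStep (1, 0, 0, false, false, false) with ⟨tl, ne, w, lh, iw, pcr⟩
  have h := foldB_spec text.toList 1 0 0 false false
  rw [hS] at h
  simp only [Prod.mk.injEq] at h
  obtain ⟨h1, h2, h3⟩ := h
  have hfil : (splitLinesRec text.toList).filter (fun l => !(PySem.Chars.strip l).isEmpty)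
      = (splitLinesRec text.toList).filter (fun l => hasNon l) := by
    apply List.filter_congr
    intro x _
    rw [strip_isEmpty]
    simp
  have e1 : ((splitLinesRec text.toList).length : Int) = tl := by
    rw [h1]; omega
  have e2 : (((splitLinesRec text.toList).filter
        (fun l => !(PySem.Chars.strip l).isEmpty)).length : Int)
      = (if lh then ne + 1 else ne) := by
    rw [hfil, h2, ← neCount_false]
    omega
  have e3 : (((splitLinesRec text.toList).map
        (fun l => ((PySem.Chars.split₀ l).length : Int))).sum)
      = (if iw then w + 1 else w) := by
    rw [h3]
    simp only [split₀_length, ← wCount_false]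
    omega
  simp [e1, e2, e3]
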